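-- pv_equiv track=rewrite | github.com/nirmata/kyverno-helm-chart | kyverno-policies/escape_kyverno_for_helm.py | _inner_has_raw_kyverno
-- ===== SOURCE A (Python) =====
-- HELM_OPEN = '{{ "{{" }}'
--
-- HELM_CLOSE = '{{ "}}" }}'
--
-- def skip_escaped_block(text: str, i: int) -> int | None:
--     """If position i starts an escaped Helm literal, return index after the block; else None."""
--     if not text.startswith(HELM_OPEN, i):
--         return None
--     j = i + len(HELM_OPEN)
--     while j < len(text):
--         if text.startswith(HELM_CLOSE, j):
--             return j + len(HELM_CLOSE)
--         j += 1
--     return None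
--
-- def _inner_has_raw_kyverno(inner: str) -> bool:
--     i = 0
--     while i < len(inner):
--         sk = skip_escaped_block(inner, i)
--         if sk is not None:
--             i = sk
--             continue
--         if inner[i : i + 2] == "{{":
--             return True
--         i += 1
--     return False
-- ===== SOURCE B (Python) =====
-- HELM_OPEN = '{{ "{{" }}'
--
-- HELM_CLOSE = '{{ "}}" }}'
--
-- def _inner_has_raw_kyverno(inner: str) -> bool:
--     # Jump between escaped blocks with substring search instead of a char-by-char scan.
--     s = inner
--     while True:
--         p = s.find(HELM_OPEN)
--         if p == -1:
--             return "{{" in s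
--         if "{{" in s[: p + 1]:
--             return True
--         q = s.find(HELM_CLOSE, p + len(HELM_OPEN))
--         if q == -1:
--             return True
--         s = s[q + len(HELM_CLOSE):]
-- ===== Notes on version B (the rewrite author's own statement) =====
-- stated objective: faster
-- what changed: A scans character by character with startswith at every index; B jumps between escaped blocks with str.find / substring-in searches on whole segments, slicing past each complete block.
import Mathlib
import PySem

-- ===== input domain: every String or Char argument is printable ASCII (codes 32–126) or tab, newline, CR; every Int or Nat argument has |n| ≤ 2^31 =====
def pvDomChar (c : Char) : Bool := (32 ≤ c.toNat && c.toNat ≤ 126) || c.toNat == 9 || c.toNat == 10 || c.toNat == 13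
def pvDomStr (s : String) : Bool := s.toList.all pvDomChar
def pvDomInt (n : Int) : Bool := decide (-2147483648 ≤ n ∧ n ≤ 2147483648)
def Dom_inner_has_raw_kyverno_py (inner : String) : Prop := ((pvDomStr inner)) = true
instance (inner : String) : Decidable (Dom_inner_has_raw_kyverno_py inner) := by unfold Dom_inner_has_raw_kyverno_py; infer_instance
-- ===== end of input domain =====

-- B replaces A's char-by-char scan by substring searches (str.find / `in`) that jump from
-- escaped block to escaped block; equivalence of the return values is proved on all strings.

-- ===== PORT A =====
-- HELM_OPEN = '{{ "{{" }}'
def helmOpen : List Char := ['{', '{', ' ', '"', '{', '{', '"', ' ', '}', '}']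
-- HELM_CLOSE = '{{ "}}" }}'
def helmClose : List Char := ['{', '{', ' ', '"', '}', '}', '"', ' ', '}', '}']

-- the inner `while j < len(text)` loop of skip_escaped_block
def closeScan (text : List Char) (j : Nat) : Option Nat :=
  if h : j < text.length then
    -- text.startswith(HELM_CLOSE, j) : exact as startswith on the drop (j ≥ 0)
    if PySem.Chars.startswith (text.drop j) helmClose then some (j + helmClose.length)
    else closeScan text (j + 1)
  else none
termination_by text.length - j

def skipEscapedBlock (text : List Char) (i : Nat) : Option Nat :=
  -- text.startswith(HELM_OPEN, i) : exact as startswith on the drop (i ≥ 0)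
  if PySem.Chars.startswith (text.drop i) helmOpen then closeScan text (i + helmOpen.length)
  else none

-- used by aLoop's termination proof
theorem closeScan_lt (text : List Char) (j k : Nat) (h : closeScan text j = some k) : j < k := by
  fun_induction closeScan text j with
  | case1 j hj hsw =>
    have hC : helmClose.length = 10 := rfl
    simp at h; omega
  | case2 j hj hsw ih => have := ih h; omega
  | case3 j hj => simp at h

theorem skipEscapedBlock_lt (text : List Char) (i k : Nat)
    (h : skipEscapedBlock text i = some k) : i < k := by
  unfold skipEscapedBlock at h
  split at h
  · have := closeScan_lt _ _ _ h; omega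
  · simp at h

-- the `while i < len(inner)` loop of _inner_has_raw_kyverno
def aLoop (inner : List Char) (i : Nat) : Bool :=
  if h : i < inner.length then
    match hsk : skipEscapedBlock inner i with
    | some sk => aLoop inner sk
    | none =>
      if PySem.List.slice inner (some (i : Int)) (some ((i : Int) + 2)) = ['{', '{'] then true
      else aLoop inner (i + 1)
  else false
termination_by inner.length - i
decreasing_by
  · have := skipEscapedBlock_lt inner i sk hsk; omega
  · omega

def inner_has_raw_kyverno_py (inner : String) : Bool := aLoop inner.toList 0

-- ===== PORT B =====
-- used by bLoop's termination proof
theorem bLoop_dec (s : List Char)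
    (hp : PySem.Chars.find s helmOpen ≠ -1)
    (hq : PySem.Chars.findFrom s helmClose (PySem.Chars.find s helmOpen + (helmOpen.length : Int)) none ≠ -1) :
    (PySem.Chars.slice s
        (some (PySem.Chars.findFrom s helmClose (PySem.Chars.find s helmOpen + (helmOpen.length : Int)) none
          + (helmClose.length : Int))) none).length < s.length := by
  have hO : helmOpen.length = 10 := rfl
  have hC : helmClose.length = 10 := rfl
  have hp0 : 0 ≤ PySem.Chars.find s helmOpen := by
    have := PySem.Chars.neg_one_le_find s helmOpen; omega
  obtain ⟨hpre, -⟩ := PySem.Chars.find_spec hp0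
  have hlen10 : (PySem.Chars.find s helmOpen).toNat + 10 ≤ s.length := by
    have h1 := hpre.length_le
    rw [hO, List.length_drop] at h1
    omega
  have hcast : PySem.Chars.find s helmOpen + (helmOpen.length : Int)
      = (((PySem.Chars.find s helmOpen).toNat + 10 : Nat) : Int) := by
    rw [hO]; omega
  rw [hcast] at hq ⊢
  rw [PySem.Chars.findFrom_natCast s helmClose _ hlen10] at hq ⊢
  split at hq
  · exact absurd rfl hq
  · rename_i hfc
    rw [if_neg hfc]
    have hfc0 : 0 ≤ PySem.Chars.find (s.drop ((PySem.Chars.find s helmOpen).toNat + 10)) helmClose := by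
      have := PySem.Chars.neg_one_le_find (s.drop ((PySem.Chars.find s helmOpen).toNat + 10)) helmClose
      omega
    rw [PySem.Chars.slice_eq_listSlice, PySem.List.slice_from _ (by rw [hC]; omega)]
    rw [List.length_drop, hC]
    omega

def bLoop (s : List Char) : Bool :=
  let p := PySem.Chars.find s helmOpen
  if hp : p = -1 then PySem.Chars.isIn ['{', '{'] s
  else if PySem.Chars.isIn ['{', '{'] (PySem.Chars.slice s none (some (p + 1))) then true
  else
    let q := PySem.Chars.findFrom s helmClose (p + (helmOpen.length : Int)) none
    if hq : q = -1 then true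
    else bLoop (PySem.Chars.slice s (some (q + (helmClose.length : Int))) none)
termination_by s.length
decreasing_by
  exact bLoop_dec s hp hq

def inner_has_raw_kyverno_py_alt (inner : String) : Bool := bLoop inner.toList

-- ===== PRECONDITION & SPEC =====
def Spec_inner_has_raw_kyverno_py (inner : String) (out : Bool) : Prop := out = inner_has_raw_kyverno_py_alt inner
instance (inner : String) (out : Bool) : Decidable (Spec_inner_has_raw_kyverno_py inner out) := by unfold Spec_inner_has_raw_kyverno_py; infer_instance

-- ===== CLAIM (what is proved, stated in full; the proofs are below) =====
def Claim_equal_inner_has_raw_kyverno_py : Prop := ∀ (inner : String), Dom_inner_has_raw_kyverno_py inner → Spec_inner_has_raw_kyverno_py inner (inner_has_raw_kyverno_py inner)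

-- ===== LEMMAS AND PROOFS =====

theorem infix_iff_exists_drop (sub s : List Char) :
    sub <:+: s ↔ ∃ j, sub <+: s.drop j :=
  ((PySem.Chars.isIn_iff_infix sub s).symm).trans
    (PySem.Chars.exists_prefix_drop_iff_isIn sub s).symm

theorem prefix_drop_infix {sub s : List Char} {k : Nat} (h : sub <+: s.drop k) : sub <:+: s :=
  h.isInfix.trans (List.drop_suffix k s).isInfix

theorem find_eq_of {s sub : List Char} {k : Nat}
    (h1 : sub <+: s.drop k) (h2 : ∀ m < k, ¬ sub <+: s.drop m) :
    PySem.Chars.find s sub = (k : Int) := by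
  have h0 : 0 ≤ PySem.Chars.find s sub :=
    (PySem.Chars.find_nonneg_iff s sub).2 (prefix_drop_infix h1)
  obtain ⟨hpre, hmin⟩ := PySem.Chars.find_spec h0
  rcases lt_trichotomy (PySem.Chars.find s sub).toNat k with h | h | h
  · exact absurd hpre (h2 _ h)
  · omega
  · exact absurd h1 (hmin k h)

-- the slice inner[i:i+2] is take 2 of drop i
theorem slice_take_two (s : List Char) (i : Nat) :
    PySem.List.slice s (some (i : Int)) (some ((i : Int) + 2)) = (s.drop i).take 2 := by
  have := PySem.List.slice_natCast_add s i 2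
  simpa using this

theorem take_two_iff {s : List Char} {i : Nat} :
    ((s.drop i).take 2 = ['{', '{']) ↔ (['{', '{'] : List Char) <+: s.drop i := by
  rw [List.prefix_iff_eq_take]
  constructor <;> (intro h; exact h.symm)

theorem aLoop_of_ge {s : List Char} {i : Nat} (h : ¬ i < s.length) : aLoop s i = false := by
  rw [aLoop]; simp [h]

theorem aLoop_some {s : List Char} {i sk : Nat} (hi : i < s.length)
    (h : skipEscapedBlock s i = some sk) : aLoop s i = aLoop s sk := by
  rw [aLoop]; simp only [hi, dif_pos]
  split
  · rename_i sk' heq; rw [h] at heq; cases heq; rfl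
  · rename_i heq; rw [h] at heq; cases heq

theorem aLoop_none {s : List Char} {i : Nat} (hi : i < s.length)
    (h : skipEscapedBlock s i = none) :
    aLoop s i = (if (s.drop i).take 2 = ['{', '{'] then true else aLoop s (i + 1)) := by
  rw [aLoop]; simp only [hi, dif_pos]
  split
  · rename_i sk' heq; rw [h] at heq; cases heq
  · rw [slice_take_two]

-- if no escaped block can ever start from position i on, A is a plain substring scan
theorem noOpen : ∀ n s i, s.length - i < n → ¬ helmOpen <:+: s.drop i →
    aLoop s i = PySem.Chars.isIn ['{', '{'] (s.drop i) := by
  intro n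
  induction n with
  | zero => omega
  | succ n ih =>
    intro s i hn hno
    by_cases hi : i < s.length
    · have hsw : PySem.Chars.startswith (s.drop i) helmOpen = false := by
        rw [Bool.eq_false_iff, Ne, PySem.Chars.startswith_iff]
        exact fun h => hno (prefix_drop_infix (k := 0) (by simpa using h))
      have hsk : skipEscapedBlock s i = none := by
        unfold skipEscapedBlock; rw [hsw]; simp
      rw [aLoop_none hi hsk]
      by_cases htw : (s.drop i).take 2 = ['{', '{']
      · rw [if_pos htw]
        have : (['{', '{'] : List Char) <:+: s.drop i :=
          (take_two_iff.1 htw).isInfix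
        rw [(PySem.Chars.isIn_iff_infix _ _).2 this]
      · rw [if_neg htw]
        have hno' : ¬ helmOpen <:+: s.drop (i + 1) := by
          intro h
          rcases (infix_iff_exists_drop _ _).1 h with ⟨j, hj⟩
          rw [List.drop_drop] at hj
          exact hno (prefix_drop_infix (k := 1 + j) (by rw [List.drop_drop, show i + (1 + j) = i + 1 + j by omega]; exact hj))
        rw [ih s (i + 1) (by omega) hno']
        have h1 : ¬ (['{', '{'] : List Char) <+: s.drop i := fun h => htw (take_two_iff.2 h)
        rcases h2 : PySem.Chars.isIn ['{', '{'] (s.drop (i + 1)) with _ | _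
        · symm
          rw [Bool.eq_false_iff, Ne, PySem.Chars.isIn_iff_infix]
          intro hin
          rcases (infix_iff_exists_drop _ _).1 hin with ⟨j, hj⟩
          rcases j with _ | j
          · exact h1 (by simpa using hj)
          · rw [List.drop_drop] at hj
            rw [PySem.Chars.isIn_eq_false_iff] at h2
            exact h2 ((infix_iff_exists_drop _ _).2
              ⟨j, by rw [List.drop_drop, show i + 1 + j = i + (j + 1) by omega]; exact hj⟩)
        · symm
          rw [PySem.Chars.isIn_iff_infix] at h2 ⊢
          rcases (infix_iff_exists_drop _ _).1 h2 with ⟨j, hj⟩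
          rw [List.drop_drop] at hj
          exact (infix_iff_exists_drop _ _).2 ⟨1 + j, by rw [List.drop_drop, show i + (1 + j) = i + 1 + j by omega]; exact hj⟩
    · rw [aLoop_of_ge hi]
      rw [List.drop_eq_nil_of_le (by omega)]
      rw [eq_comm, Bool.eq_false_iff, Ne, PySem.Chars.isIn_iff_infix]
      intro h; simpa using h.length_le
  -- (cases close)

-- a raw "{{" at offset j with no block start at offsets ≤ j makes A return true
theorem trueBefore : ∀ j s i, (∀ m ≤ j, ¬ helmOpen <+: s.drop (i + m)) →
    (['{', '{'] : List Char) <+: s.drop (i + j) → aLoop s i = true := by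
  intro j
  induction j with
  | zero =>
    intro s i hno hpre
    simp only [Nat.add_zero] at hpre
    have hi : i < s.length := by
      by_contra hi
      rw [List.drop_eq_nil_of_le (by omega)] at hpre
      simpa using hpre.length_le
    have hsk : skipEscapedBlock s i = none := by
      unfold skipEscapedBlock
      have : PySem.Chars.startswith (s.drop i) helmOpen = false := by
        rw [Bool.eq_false_iff, Ne, PySem.Chars.startswith_iff]
        exact hno 0 (by omega) ∘ (by simpa using ·)
      rw [this]; simp
    rw [aLoop_none hi hsk, if_pos (take_two_iff.2 hpre)]
  | succ j ih =>
    intro s i hno hpre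
    have hij : i + (j + 1) < s.length := by
      by_contra hij
      rw [List.drop_eq_nil_of_le (by omega)] at hpre
      simpa using hpre.length_le
    have hi : i < s.length := by omega
    have hsk : skipEscapedBlock s i = none := by
      unfold skipEscapedBlock
      have : PySem.Chars.startswith (s.drop i) helmOpen = false := by
        rw [Bool.eq_false_iff, Ne, PySem.Chars.startswith_iff]
        exact hno 0 (by omega) ∘ (by simpa using ·)
      rw [this]; simp
    rw [aLoop_none hi hsk]
    by_cases htw : (s.drop i).take 2 = ['{', '{']
    · rw [if_pos htw]
    · rw [if_neg htw]
      exact ih s (i + 1)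
        (fun m hm => by
          have h' := hno (m + 1) (by omega)
          rwa [show i + (m + 1) = i + 1 + m by omega] at h')
        (by rwa [show i + (j + 1) = i + 1 + j by omega] at hpre)

-- positions with neither a block start nor a raw "{{" are just stepped over
theorem advance : ∀ j s i,
    (∀ m < j, ¬ helmOpen <+: s.drop (i + m) ∧ ¬ (['{', '{'] : List Char) <+: s.drop (i + m)) →
    aLoop s i = aLoop s (i + j) := by
  intro j
  induction j with
  | zero => intro s i _; rfl
  | succ j ih =>
    intro s i h
    by_cases hi : i < s.length
    · have h0 := h 0 (by omega)
      simp only [Nat.add_zero] at h0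
      have hsk : skipEscapedBlock s i = none := by
        unfold skipEscapedBlock
        have : PySem.Chars.startswith (s.drop i) helmOpen = false := by
          rw [Bool.eq_false_iff, Ne, PySem.Chars.startswith_iff]
          exact h0.1
        rw [this]; simp
      rw [aLoop_none hi hsk, if_neg (fun htw => h0.2 (take_two_iff.1 htw))]
      rw [ih s (i + 1) (fun m hm => by
        have h' := h (m + 1) (by omega)
        rwa [show i + (m + 1) = i + 1 + m by omega] at h')]
      rw [show i + 1 + j = i + (j + 1) by omega]
    · rw [aLoop_of_ge hi, aLoop_of_ge (by omega)]

-- closeScan computes "first HELM_CLOSE occurrence from j", i.e. find on the drop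
theorem closeScan_eq : ∀ text j, closeScan text j =
    (if PySem.Chars.find (text.drop j) helmClose = -1 then none
     else some (j + (PySem.Chars.find (text.drop j) helmClose).toNat + helmClose.length)) := by
  intro text j
  fun_induction closeScan text j with
  | case1 j hj hsw =>
    rw [PySem.Chars.startswith_iff] at hsw
    have : PySem.Chars.find (text.drop j) helmClose = ((0 : Nat) : Int) :=
      find_eq_of (by simpa using hsw) (by omega)
    rw [this]; norm_num
  | case2 j hj hsw ih =>
    rw [PySem.Chars.startswith_iff] at hsw
    have hdj : text.drop j = text[j] :: text.drop (j + 1) :=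
      List.drop_eq_getElem_cons hj
    by_cases hf : PySem.Chars.find (text.drop (j + 1)) helmClose = -1
    · -- no close from j+1, and none at j: none overall
      rw [ih, if_pos hf]
      have : PySem.Chars.find (text.drop j) helmClose = -1 := by
        rw [PySem.Chars.find_eq_neg_one_iff]
        intro hin
        rcases (infix_iff_exists_drop _ _).1 hin with ⟨m, hm⟩
        rcases m with _ | m
        · exact hsw (by simpa using hm)
        · rw [List.drop_drop] at hm
          rw [PySem.Chars.find_eq_neg_one_iff] at hf
          exact hf ((infix_iff_exists_drop _ _).2 ⟨m, by rw [List.drop_drop, show j + 1 + m = j + (m + 1) by omega]; exact hm⟩)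
      rw [this]; simp
    · have hf0 : 0 ≤ PySem.Chars.find (text.drop (j + 1)) helmClose := by
        have := PySem.Chars.neg_one_le_find (text.drop (j + 1)) helmClose; omega
      obtain ⟨hpre, hmin⟩ := PySem.Chars.find_spec hf0
      set f := (PySem.Chars.find (text.drop (j + 1)) helmClose).toNat with hfdef
      have hstep : PySem.Chars.find (text.drop j) helmClose = ((f + 1 : Nat) : Int) := by
        apply find_eq_of
        · rw [List.drop_drop] at hpre ⊢
          rw [show j + (f + 1) = j + 1 + f by omega]
          exact hpre
        · intro m hm
          rcases m with _ | m
          · exact fun h => hsw (by simpa using h)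
          · intro h
            rw [List.drop_drop] at h
            exact hmin m (by omega)
              (by rw [List.drop_drop, show j + 1 + m = j + (m + 1) by omega]; exact h)
      rw [ih, if_neg hf, hstep]
      have : ¬ ((f + 1 : Nat) : Int) = -1 := by omega
      rw [if_neg this]
      congr 1
      have : (((f + 1 : Nat) : Int)).toNat = f + 1 := by omega
      rw [this]; omega
  | case3 j hj =>
    have : PySem.Chars.find (text.drop j) helmClose = -1 := by
      rw [List.drop_eq_nil_of_le (by omega), PySem.Chars.find_eq_neg_one_iff]
      intro h
      have := h.length_le
      simp [helmClose] at this
    rw [this]; simp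

-- conditional unfoldings of bLoop
theorem bLoop_none {s : List Char} (h : PySem.Chars.find s helmOpen = -1) :
    bLoop s = PySem.Chars.isIn ['{', '{'] s := by
  rw [bLoop]; simp [h]

theorem bLoop_found_raw {s : List Char} (hp : PySem.Chars.find s helmOpen ≠ -1)
    (h2 : PySem.Chars.isIn ['{', '{'] (PySem.Chars.slice s none (some (PySem.Chars.find s helmOpen + 1))) = true) :
    bLoop s = true := by
  rw [PySem.Chars.slice_eq_listSlice] at h2
  rw [bLoop]; simp [hp, h2]

theorem bLoop_noclose {s : List Char} (hp : PySem.Chars.find s helmOpen ≠ -1)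
    (h2 : PySem.Chars.isIn ['{', '{'] (PySem.Chars.slice s none (some (PySem.Chars.find s helmOpen + 1))) = false)
    (hq : PySem.Chars.findFrom s helmClose (PySem.Chars.find s helmOpen + (helmOpen.length : Int)) none = -1) :
    bLoop s = true := by
  rw [PySem.Chars.slice_eq_listSlice] at h2
  rw [bLoop]; simp [hp, h2, hq]

theorem bLoop_step {s : List Char} (hp : PySem.Chars.find s helmOpen ≠ -1)
    (h2 : PySem.Chars.isIn ['{', '{'] (PySem.Chars.slice s none (some (PySem.Chars.find s helmOpen + 1))) = false)
    (hq : PySem.Chars.findFrom s helmClose (PySem.Chars.find s helmOpen + (helmOpen.length : Int)) none ≠ -1) :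
    bLoop s = bLoop (PySem.Chars.slice s
      (some (PySem.Chars.findFrom s helmClose (PySem.Chars.find s helmOpen + (helmOpen.length : Int)) none
        + (helmClose.length : Int))) none) := by
  rw [PySem.Chars.slice_eq_listSlice] at h2
  rw [bLoop]; simp [hp, h2, hq]

-- the main induction: A's scan from i equals B on the corresponding suffix
theorem aLoop_eq_bLoop : ∀ n s i, s.length - i < n → aLoop s i = bLoop (s.drop i) := by
  intro n
  induction n with
  | zero => omega
  | succ n ih =>
    intro s i hn
    by_cases hp : PySem.Chars.find (s.drop i) helmOpen = -1
    · rw [bLoop_none hp]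
      exact noOpen (s.length - i + 1) s i (by omega)
        ((PySem.Chars.find_eq_neg_one_iff _ _).1 hp)
    · -- an escaped block starts at offset P in the suffix t := s.drop i
      have hp0 : 0 ≤ PySem.Chars.find (s.drop i) helmOpen := by
        have := PySem.Chars.neg_one_le_find (s.drop i) helmOpen; omega
      obtain ⟨hpre, hmin⟩ := PySem.Chars.find_spec hp0
      set P := (PySem.Chars.find (s.drop i) helmOpen).toNat with hPdef
      have hlen10 : P + 10 ≤ (s.drop i).length := by
        have h1 := hpre.length_le
        have hO : helmOpen.length = 10 := rfl
        rw [hO, List.length_drop] at h1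
        omega
      have hi : i < s.length := by
        have := hlen10
        rw [List.length_drop] at this
        omega
      by_cases h2 : PySem.Chars.isIn ['{', '{']
          (PySem.Chars.slice (s.drop i) none (some (PySem.Chars.find (s.drop i) helmOpen + 1))) = true
      · -- a raw "{{" strictly before the block start: both sides are true
        rw [bLoop_found_raw hp h2]
        have hcast : PySem.Chars.find (s.drop i) helmOpen + 1 = ((P + 1 : Nat) : Int) := by omega
        rw [hcast, PySem.Chars.slice_eq_listSlice, PySem.List.slice_to _ (by positivity)] at h2
        have : (((P + 1 : Nat) : Int)).toNat = P + 1 := by omega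
        rw [this] at h2
        rcases (PySem.Chars.exists_prefix_drop_iff_isIn _ _).2 h2 with ⟨j, hj⟩
        have hjlen : j + 2 ≤ P + 1 := by
          have h3 := hj.length_le
          simp only [List.length_cons, List.length_nil, List.length_drop, List.length_take] at h3
          omega
        have hj' : (['{', '{'] : List Char) <+: s.drop (i + j) := by
          have : ((s.drop i).take (P + 1)).drop j = ((s.drop i).drop j).take (P + 1 - j) := by
            rw [List.drop_take]
          rw [this, List.drop_drop] at hj
          exact hj.trans (List.take_prefix _ _)
        exact (trueBefore j s i (fun m hm h => by
          have : helmOpen <+: (s.drop i).drop m := by rwa [List.drop_drop]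
          exact hmin m (by omega) this) hj').trans
          rfl
      · rw [Bool.not_eq_true] at h2
        -- A steps to the block start at i + P without returning
        have hadv : aLoop s i = aLoop s (i + P) := by
          apply advance
          intro m hm
          constructor
          · intro h
            exact hmin m hm (by rwa [← List.drop_drop] at h)
          · intro h
            rw [PySem.Chars.isIn_eq_false_iff] at h2
            apply h2
            apply (infix_iff_exists_drop _ _).2
            refine ⟨m, ?_⟩
            have hcast : PySem.Chars.find (s.drop i) helmOpen + 1 = ((P + 1 : Nat) : Int) := by omega
            rw [hcast, PySem.Chars.slice_eq_listSlice, PySem.List.slice_to _ (by positivity)]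
            have h5 : (((P + 1 : Nat) : Int)).toNat = P + 1 := by omega
            rw [h5, List.drop_take]
            rw [← List.drop_drop] at h
            have : (['{', '{'] : List Char) = (((s.drop i).drop m).take (P + 1 - m)).take 2 := by
              rw [List.take_take, min_eq_left (by omega)]
              rw [List.prefix_iff_eq_take] at h
              simpa using h
            rw [List.prefix_iff_eq_take]
            simpa using this
        rw [hadv]
        -- at i + P: the block starts; A consults closeScan, B consults findFrom
        have hiP : i + P < s.length := by rw [List.length_drop] at hlen10; omega
        have hdropP : (s.drop i).drop P = s.drop (i + P) := by
          rw [List.drop_drop]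
        have hsw : PySem.Chars.startswith (s.drop (i + P)) helmOpen = true := by
          rw [PySem.Chars.startswith_iff, ← hdropP]; exact hpre
        have hsk : skipEscapedBlock s (i + P) = closeScan s (i + P + helmOpen.length) := by
          unfold skipEscapedBlock; rw [hsw]; try simp
        have hlenOpen : helmOpen.length = 10 := rfl
        have hcs := closeScan_eq s (i + P + helmOpen.length)
        have hdrop10 : s.drop (i + P + helmOpen.length) = (s.drop i).drop (P + 10) := by
          rw [List.drop_drop, hlenOpen, show i + (P + 10) = i + P + 10 by omega]
        -- B's q via findFrom_natCast
        have hcastq : PySem.Chars.find (s.drop i) helmOpen + (helmOpen.length : Int)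
            = ((P + 10 : Nat) : Int) := by
          rw [hlenOpen]; omega
        have hff := PySem.Chars.findFrom_natCast (s.drop i) helmClose (P + 10) hlen10
        set f := PySem.Chars.find ((s.drop i).drop (P + 10)) helmClose with hfdef
        by_cases hf : f = -1
        · -- unclosed block: A returns true at i+P (since "{{" starts there), B returns true
          have hskn : skipEscapedBlock s (i + P) = none := by
            rw [hsk, hcs, hdrop10, ← hfdef, if_pos hf]
          have hq : PySem.Chars.findFrom (s.drop i) helmClose
              (PySem.Chars.find (s.drop i) helmOpen + (helmOpen.length : Int)) none = -1 := by
            rw [hcastq, hff, if_pos hf]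
          rw [bLoop_noclose hp h2 hq, aLoop_none hiP hskn]
          have : (s.drop (i + P)).take 2 = ['{', '{'] := by
            have h6 : helmOpen = (s.drop (i + P)).take 10 := by
              have := hpre
              rw [hdropP] at this
              rw [List.prefix_iff_eq_take] at this
              simpa [helmOpen] using this
            have : (s.drop (i + P)).take 2 = (( s.drop (i+P)).take 10).take 2 := by
              rw [List.take_take]; norm_num
            rw [this, ← h6]
            simp [helmOpen]
          rw [if_pos this]
        · -- block closes: both jump past it and recurse on the same suffix
          have hf0 : 0 ≤ f := by
            have := PySem.Chars.neg_one_le_find ((s.drop i).drop (P + 10)) helmClose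
            rw [← hfdef] at this; omega
          have hsks : skipEscapedBlock s (i + P)
              = some (i + P + helmOpen.length + f.toNat + helmClose.length) := by
            rw [hsk, hcs, hdrop10, ← hfdef, if_neg hf]
          have hq : PySem.Chars.findFrom (s.drop i) helmClose
              (PySem.Chars.find (s.drop i) helmOpen + (helmOpen.length : Int)) none
              = ((P + 10 : Nat) : Int) + f := by
            rw [hcastq, hff, if_neg hf]
          rw [aLoop_some hiP hsks]
          rw [bLoop_step hp h2 (by rw [hq]; omega)]
          rw [hq]
          have hlenClose : helmClose.length = 10 := rfl
          have hslice : PySem.Chars.slice (s.drop i)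
              (some (((P + 10 : Nat) : Int) + f + (helmClose.length : Int))) none
              = s.drop (i + P + 10 + f.toNat + 10) := by
            rw [PySem.Chars.slice_eq_listSlice, PySem.List.slice_from _ (by rw [hlenClose]; omega)]
            rw [List.drop_drop]
            congr 1
            rw [hlenClose]
            omega
          rw [hslice]
          have harg : i + P + helmOpen.length + f.toNat + helmClose.length
              = i + P + 10 + f.toNat + 10 := by rw [hlenOpen, hlenClose]
          rw [harg]
          have : s.drop (i + P + 10 + f.toNat + 10) = s.drop (i + (P + 10 + f.toNat + 10)) := by
            congr 1; omega
          rw [this, show i + P + 10 + f.toNat + 10 = i + (P + 10 + f.toNat + 10) by omega]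
          exact ih s (i + (P + 10 + f.toNat + 10)) (by omega)

-- ===== VERDICT (by name: the statement is the Claim_ definition above) =====
theorem inner_has_raw_kyverno_py_spec : Claim_equal_inner_has_raw_kyverno_py := by
  intro inner _
  unfold Spec_inner_has_raw_kyverno_py inner_has_raw_kyverno_py inner_has_raw_kyverno_py_alt
  have := aLoop_eq_bLoop (inner.toList.length + 1) inner.toList 0 (by omega)
  simpa using this
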